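-- pv_equiv track=rewrite | github.com/makoto-hyodo-asahi-gh/postgres-agentic-shop | backend/src/utils/utils.py | _reorder_parallel_nodes
-- ===== SOURCE A (Python) =====
-- def _reorder_parallel_nodes(nodes: list[dict]) -> list[dict]:
--     """
--     Reorder in-place the visible nodes with labels:
--     "Personalization Agent", "Review Agent", "Inventory Agent"
--     to the order: Personalization Agent, Review Agent, Inventory Agent.
--     Other nodes remain in their original relative order.
--     """
--
--     desired_order = ["Product Personalization Agent", "Review Agent", "Inventory Agent"]
--
--     # Find indices of visible nodes with these labels
--     label_to_index = {}
--     for i, node in enumerate(nodes):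
--         label = node["data"].get("label")
--         if label in desired_order and label not in label_to_index:
--             label_to_index[label] = i
--
--     # If any of the three nodes are missing, do nothing
--     if not all(label in label_to_index for label in desired_order):
--         return nodes
--
--     # Get current indices
--     idx_personalization = label_to_index["Product Personalization Agent"]
--     idx_review = label_to_index["Review Agent"]
--     idx_inventory = label_to_index["Inventory Agent"]
--
--     # We want them in order: Personalization < Review < Inventory
--     # Swap nodes pairwise to achieve this order
--
--     # Helper to swap nodes at two indices
--     def swap(i, j):
--         nodes[i], nodes[j] = nodes[j], nodes[i]
--
--     # Step 1: Ensure Personalization Agent is before Review Agent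
--     if idx_personalization > idx_review:
--         swap(idx_personalization, idx_review)
--         idx_personalization, idx_review = idx_review, idx_personalization
--
--     # Step 2: Ensure Review Agent is before Inventory Agent
--     if idx_review > idx_inventory:
--         swap(idx_review, idx_inventory)
--         idx_review, idx_inventory = idx_inventory, idx_review
--
--     # Step 3: Re-check Personalization vs Review after step 2 swap
--     if idx_personalization > idx_review:
--         swap(idx_personalization, idx_review)
--
--     return nodes
-- ===== SOURCE B (Python) =====
-- def _reorder_parallel_nodes(nodes: list[dict]) -> list[dict]:
--     """Sort-and-place rewrite: find the three agent indices, sort them to get the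
--     target slots, and assign the saved nodes directly (mutates nodes in place,
--     like the original)."""
--     desired_order = ["Product Personalization Agent", "Review Agent", "Inventory Agent"]
--
--     label_to_index = {}
--     for i, node in enumerate(nodes):
--         label = node["data"].get("label")
--         if label in desired_order and label not in label_to_index:
--             label_to_index[label] = i
--
--     if len(label_to_index) != 3:
--         return nodes
--
--     idxs = [label_to_index[label] for label in desired_order]
--     saved = [nodes[j] for j in idxs]
--     targets = sorted(idxs)
--     for t, n in zip(targets, saved):
--         nodes[t] = n
--     return nodes
-- ===== Notes on version B (the rewrite author's own statement) =====
-- stated objective: simpler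
-- what changed: Replaces the three conditional pairwise-swap steps (a sorting network with index bookkeeping) by saving the three agent nodes, sorting their indices, and assigning each node directly into its sorted slot; the presence guard becomes a single len(label_to_index) != 3 check.
import Mathlib
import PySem

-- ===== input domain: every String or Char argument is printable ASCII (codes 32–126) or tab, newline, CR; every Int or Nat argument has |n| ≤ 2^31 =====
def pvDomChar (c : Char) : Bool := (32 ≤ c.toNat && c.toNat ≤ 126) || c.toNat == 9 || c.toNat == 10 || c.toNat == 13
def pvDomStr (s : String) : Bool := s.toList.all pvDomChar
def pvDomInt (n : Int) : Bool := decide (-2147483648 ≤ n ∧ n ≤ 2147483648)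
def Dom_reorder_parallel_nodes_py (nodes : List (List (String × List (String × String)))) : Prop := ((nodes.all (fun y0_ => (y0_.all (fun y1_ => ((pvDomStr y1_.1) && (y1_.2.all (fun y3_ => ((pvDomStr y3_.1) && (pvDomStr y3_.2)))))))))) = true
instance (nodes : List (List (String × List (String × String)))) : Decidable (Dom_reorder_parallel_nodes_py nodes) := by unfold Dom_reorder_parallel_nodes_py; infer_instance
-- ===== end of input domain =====

-- B replaces A's conditional pairwise-swap sorting network by sort-indices-then-place (objective: simpler).
-- Both Pythons mutate `nodes` in place the same way; the equivalence proved here is about the return value.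


-- ===== PORT A =====
def pvDesiredA : List String := ["Product Personalization Agent", "Review Agent", "Inventory Agent"]

-- node["data"].get("label")  (node["data"] is total here; Pre_ requires the "data" key to be present)
def pvLabelA (node : List (String × List (String × String))) : Option String :=
  PySem.Dict.get? (PySem.Dict.mk ((PySem.Dict.mk node).getD "data" [])) "label"

-- the `for i, node in enumerate(nodes)` loop building label_to_index
def pvBuildA (pairs : List (Int × List (String × List (String × String))))
    (d : PySem.Dict String Int) : PySem.Dict String Int :=
  match pairs with
  | [] => d
  | (i, node) :: rest =>
      pvBuildA rest
        (match pvLabelA node with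
         | some label => if label ∈ pvDesiredA ∧ d.contains label = false then d.insert label i else d
         | none => d)

-- def swap(i, j): nodes[i], nodes[j] = nodes[j], nodes[i]
def pvSwapA (ns : List (List (String × List (String × String)))) (i j : Int) :
    List (List (String × List (String × String))) :=
  let vi := PySem.List.pyGetD ns i []
  let vj := PySem.List.pyGetD ns j []
  PySem.List.pySetD (PySem.List.pySetD ns i vj) j vi

-- the three conditional swap steps of A
def pvArrangeA (nodes : List (List (String × List (String × String)))) (p r i : Int) :
    List (List (String × List (String × String))) :=
  let s1 := if r < p then (pvSwapA nodes p r, r, p) else (nodes, p, r)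
  let ns1 := s1.1
  let p1 := s1.2.1
  let r1 := s1.2.2
  let s2 := if i < r1 then (pvSwapA ns1 r1 i, i, r1) else (ns1, r1, i)
  let ns2 := s2.1
  let r2 := s2.2.1
  if r2 < p1 then pvSwapA ns2 p1 r2 else ns2

def reorder_parallel_nodes_py (nodes : List (List (String × List (String × String)))) :
    List (List (String × List (String × String))) :=
  let d := pvBuildA (PySem.List.enumerate nodes) PySem.Dict.empty
  if pvDesiredA.all (fun label => d.contains label) then
    pvArrangeA nodes (d.getD "Product Personalization Agent" 0) (d.getD "Review Agent" 0)
      (d.getD "Inventory Agent" 0)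
  else nodes

-- ===== PORT B =====
def pvDesiredB : List String := ["Product Personalization Agent", "Review Agent", "Inventory Agent"]

def pvLabelB (node : List (String × List (String × String))) : Option String :=
  PySem.Dict.get? (PySem.Dict.mk ((PySem.Dict.mk node).getD "data" [])) "label"

def pvBuildB (pairs : List (Int × List (String × List (String × String))))
    (d : PySem.Dict String Int) : PySem.Dict String Int :=
  match pairs with
  | [] => d
  | (i, node) :: rest =>
      pvBuildB rest
        (match pvLabelB node with
         | some label => if label ∈ pvDesiredB ∧ d.contains label = false then d.insert label i else d
         | none => d)

-- saved = [nodes[j] for j in idxs]; targets = sorted(idxs); for t, n in zip(targets, saved): nodes[t] = n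
def pvPlaceB (nodes : List (List (String × List (String × String)))) (idxs : List Int) :
    List (List (String × List (String × String))) :=
  let saved := idxs.map (fun j => PySem.List.pyGetD nodes j [])
  let targets := PySem.List.sorted idxs (fun x => x)
  (targets.zip saved).foldl (fun ns tn => PySem.List.pySetD ns tn.1 tn.2) nodes

def reorder_parallel_nodes_py_alt (nodes : List (List (String × List (String × String)))) :
    List (List (String × List (String × String))) :=
  let d := pvBuildB (PySem.List.enumerate nodes) PySem.Dict.empty
  if d.size = 3 then
    pvPlaceB nodes (pvDesiredB.map (fun label => d.getD label 0))
  else nodes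

-- ===== PRECONDITION & SPEC =====
-- Pre_ excludes exactly the inputs where A raises KeyError: a node without the "data" key.
def Pre_reorder_parallel_nodes_py (nodes : List (List (String × List (String × String)))) : Prop :=
  ∀ node ∈ nodes, (PySem.Dict.mk node).contains "data" = true
instance (nodes : List (List (String × List (String × String)))) : Decidable (Pre_reorder_parallel_nodes_py nodes) := by unfold Pre_reorder_parallel_nodes_py; infer_instance

def pvWitness_reorder_parallel_nodes_py : (List (List (String × List (String × String)))) :=
  [[("data", [("label", "Inventory Agent")])],
   [("data", [("label", "Review Agent")])],
   [("data", [("label", "Product Personalization Agent")])]]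

def Spec_reorder_parallel_nodes_py (nodes : List (List (String × List (String × String)))) (out : List (List (String × List (String × String)))) : Prop := out = reorder_parallel_nodes_py_alt nodes
instance (nodes : List (List (String × List (String × String)))) (out : List (List (String × List (String × String)))) : Decidable (Spec_reorder_parallel_nodes_py nodes out) := by unfold Spec_reorder_parallel_nodes_py; infer_instance

-- ===== CLAIM (what is proved, stated in full; the proofs are below) =====
def Claim_equal_reorder_parallel_nodes_py : Prop := ∀ (nodes : List (List (String × List (String × String)))), Dom_reorder_parallel_nodes_py nodes → Pre_reorder_parallel_nodes_py nodes → Spec_reorder_parallel_nodes_py nodes (reorder_parallel_nodes_py nodes)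

-- ===== LEMMAS AND PROOFS =====

-- B's helpers compute the same dictionary as A's (same loop, written twice)
lemma pvBuild_eq (pairs : List (Int × List (String × List (String × String))))
    (d : PySem.Dict String Int) : pvBuildB pairs d = pvBuildA pairs d := by
  induction pairs generalizing d with
  | nil => rfl
  | cons hd tl ih =>
      obtain ⟨i, node⟩ := hd
      simp only [pvBuildA, pvBuildB, pvLabelA, pvLabelB, pvDesiredA, pvDesiredB, ih]
      rfl

-- every entry of the built dictionary: a desired label, mapped to a valid index carrying that label
def pvGoodIdx (nodes : List (List (String × List (String × String)))) (l : String) (j : Int) : Prop :=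
  l ∈ pvDesiredA ∧ 0 ≤ j ∧ j.toNat < nodes.length ∧ pvLabelA (nodes.getD j.toNat []) = some l

lemma pvBuild_inv_aux (nodes : List (List (String × List (String × String)))) :
    ∀ (xs : List (List (String × List (String × String)))) (s : Int) (d : PySem.Dict String Int),
      (∀ l j, d.get? l = some j → pvGoodIdx nodes l j) →
      (∀ (k : Nat), k < xs.length → ∀ l, pvLabelA (xs.getD k []) = some l →
          0 ≤ s + (k : Int) ∧ (s + (k : Int)).toNat < nodes.length ∧
            pvLabelA (nodes.getD (s + (k : Int)).toNat []) = some l) →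
      ∀ l j, (pvBuildA (PySem.List.enumerate xs s) d).get? l = some j → pvGoodIdx nodes l j := by
  intro xs
  induction xs with
  | nil => intro s d hd _ l j hget; exact hd l j (by simpa [pvBuildA, PySem.List.enumerate] using hget)
  | cons x tl ih =>
      intro s d hd hloop l j hget
      rw [PySem.List.enumerate_cons] at hget
      simp only [pvBuildA] at hget
      refine ih (s + 1) _ ?_ ?_ l j hget
      · intro l' j' hg
        rcases hlx : pvLabelA x with _ | lab
        · rw [hlx] at hg; exact hd l' j' hg
        · rw [hlx] at hg
          simp only [] at hg
          by_cases hcond : lab ∈ pvDesiredA ∧ d.contains lab = false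
          · rw [if_pos hcond, PySem.Dict.get?_insert] at hg
            split_ifs at hg with he
            · have hg' : s = j' := Option.some.inj hg
              have h0 := hloop 0 (by simp) lab (by simpa using hlx)
              rw [he, ← hg']
              exact ⟨hcond.1, by simpa using h0⟩
            · exact hd l' j' hg
          · rw [if_neg hcond] at hg; exact hd l' j' hg
      · intro k hk l' hl'
        have := hloop (k + 1) (by simpa using hk) l' (by simpa using hl')
        have harith : s + ((k : Int) + 1) = s + 1 + (k : Int) := by ring
        constructor
        · omega
        · constructor
          · have h2 := this.2.1
            push_cast at h2 ⊢
            omega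
          · have h3 := this.2.2
            push_cast at h3 ⊢
            have : (s + 1 + (k : Int)).toNat = (s + ((k : Int) + 1)).toNat := by omega
            rw [this]
            exact h3

lemma pvBuild_inv (nodes : List (List (String × List (String × String)))) :
    ∀ l j, (pvBuildA (PySem.List.enumerate nodes) PySem.Dict.empty).get? l = some j →
      pvGoodIdx nodes l j := by
  refine pvBuild_inv_aux nodes nodes 0 PySem.Dict.empty (by simp [PySem.Dict.get?_empty]) ?_
  intro k hk l hl
  refine ⟨by omega, by simpa using hk, ?_⟩
  have : ((0 : Int) + (k : Int)).toNat = k := by omega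
  rw [this]
  exact hl

lemma pvBuild_nodup :
    ∀ (xs : List (List (String × List (String × String)))) (s : Int) (d : PySem.Dict String Int),
      d.keys.Nodup → (pvBuildA (PySem.List.enumerate xs s) d).keys.Nodup := by
  intro xs
  induction xs with
  | nil => intro s d hd; simpa [pvBuildA, PySem.List.enumerate] using hd
  | cons x tl ih =>
      intro s d hd
      rw [PySem.List.enumerate_cons]
      simp only [pvBuildA]
      refine ih (s + 1) _ ?_
      rcases pvLabelA x with _ | lab
      <;> simp only []
      · exact hd
      · split_ifs with hc
        · exact PySem.Dict.nodup_keys_insert _ _ _ hd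
        · exact hd

lemma pvBuild_keys_sub (nodes : List (List (String × List (String × String)))) :
    (pvBuildA (PySem.List.enumerate nodes) PySem.Dict.empty).keys ⊆ pvDesiredA := by
  intro l hl
  have : (pvBuildA (PySem.List.enumerate nodes) PySem.Dict.empty).get? l ≠ none := by
    intro h
    exact (PySem.Dict.get?_eq_none_iff_not_mem_keys _ _ |>.mp h) hl
  obtain ⟨j, hj⟩ := Option.ne_none_iff_exists'.mp this
  exact (pvBuild_inv nodes l j hj).1

-- A's guard (all three labels present) is B's guard (the dict has exactly three entries)
lemma pvGuard_iff (d : PySem.Dict String Int) (hnd : d.keys.Nodup) (hsub : d.keys ⊆ pvDesiredA) :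
    (pvDesiredA.all (fun label => d.contains label) = true) ↔ d.size = 3 := by
  have hlen : d.keys.length = d.size := by
    simp [PySem.Dict.keys, PySem.Dict.size]
  have hdn : (pvDesiredA : List String).Nodup := by decide
  constructor
  · intro hall
    have hsub' : pvDesiredA ⊆ d.keys := by
      intro l hlmem
      have := List.all_eq_true.mp hall l hlmem
      exact (PySem.Dict.contains_iff_mem_keys d l).mp (by simpa using this)
    have hperm : d.keys.Perm pvDesiredA :=
      (hnd.subperm hsub).antisymm (hdn.subperm hsub')
    have := hperm.length_eq
    simp [pvDesiredA] at this
    omega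
  · intro hsize
    have hsp : d.keys.Subperm pvDesiredA := hnd.subperm hsub
    have hperm : d.keys.Perm pvDesiredA := by
      refine hsp.perm_of_length_le ?_
      simp [pvDesiredA]
      omega
    refine List.all_eq_true.mpr ?_
    intro l hlmem
    simpa using (PySem.Dict.contains_iff_mem_keys d l).mpr (hperm.symm.subset hlmem)

-- the sorting network of A equals the sort-and-place of B, for distinct in-range indices
lemma pvArrange_eq_place (nodes : List (List (String × List (String × String)))) (p r i : Nat)
    (hp : p < nodes.length) (hr : r < nodes.length) (hi : i < nodes.length)
    (hpr : p ≠ r) (hpi : p ≠ i) (hri : r ≠ i) :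
    pvArrangeA nodes (p : Int) (r : Int) (i : Int) =
      pvPlaceB nodes [(p : Int), (r : Int), (i : Int)] := by
  rcases Nat.lt_or_ge p r with h1 | h1 <;> rcases Nat.lt_or_ge r i with h2 | h2 <;>
    rcases Nat.lt_or_ge p i with h3 | h3 <;> try omega
  · -- p < r < i
    have hs : PySem.List.sorted [(p:Int), (r:Int), (i:Int)] (fun x => x) = [(p:Int), (r:Int), (i:Int)] :=
      PySem.List.sorted_eq_of_perm_of_pairwise_lt _ _ _ (List.Perm.refl _)
        (by simp [List.pairwise_cons]; omega)
    have c0 : ((r:Int) < (p:Int)) = False := by simp; omega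
    have c1 : ((i:Int) < (r:Int)) = False := by simp; omega
    simp only [pvArrangeA, pvPlaceB, pvSwapA, hs, c0, c1, if_false]
    simp only [PySem.List.pySetD_natCast, PySem.List.pyGetD_natCast, List.map, List.zip,
      List.zipWith, List.foldl, List.getD_eq_getElem?_getD]
    apply List.ext_getElem (by simp)
    intro k hk1 hk2
    simp only [List.getElem_set, List.getElem?_set, List.length_set]
    split_ifs <;> simp_all
  · -- p < i < r
    have hs : PySem.List.sorted [(p:Int), (r:Int), (i:Int)] (fun x => x) = [(p:Int), (i:Int), (r:Int)] :=
      PySem.List.sorted_eq_of_perm_of_pairwise_lt _ _ _ ((List.Perm.swap (r:Int) (i:Int) []).cons (p:Int))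
        (by simp [List.pairwise_cons]; omega)
    have c0 : ((r:Int) < (p:Int)) = False := by simp; omega
    have c1 : ((i:Int) < (r:Int)) = True := by simp; omega
    have c2 : ((i:Int) < (p:Int)) = False := by simp; omega
    simp only [pvArrangeA, pvPlaceB, pvSwapA, hs, c0, c1, c2, if_true, if_false]
    simp only [PySem.List.pySetD_natCast, PySem.List.pyGetD_natCast, List.map, List.zip,
      List.zipWith, List.foldl, List.getD_eq_getElem?_getD]
    apply List.ext_getElem (by simp)
    intro k hk1 hk2
    simp only [List.getElem_set, List.getElem?_set, List.length_set]
    split_ifs <;> simp_all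
  · -- i < p < r
    have hs : PySem.List.sorted [(p:Int), (r:Int), (i:Int)] (fun x => x) = [(i:Int), (p:Int), (r:Int)] :=
      PySem.List.sorted_eq_of_perm_of_pairwise_lt _ _ _ ((List.Perm.swap (p:Int) (i:Int) [(r:Int)]).trans ((List.Perm.swap (r:Int) (i:Int) []).cons (p:Int)))
        (by simp [List.pairwise_cons]; omega)
    have c0 : ((r:Int) < (p:Int)) = False := by simp; omega
    have c1 : ((i:Int) < (r:Int)) = True := by simp; omega
    have c2 : ((i:Int) < (p:Int)) = True := by simp; omega
    simp only [pvArrangeA, pvPlaceB, pvSwapA, hs, c0, c1, c2, if_true, if_false]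
    simp only [PySem.List.pySetD_natCast, PySem.List.pyGetD_natCast, List.map, List.zip,
      List.zipWith, List.foldl, List.getD_eq_getElem?_getD]
    apply List.ext_getElem (by simp)
    intro k hk1 hk2
    simp only [List.getElem_set, List.getElem?_set, List.length_set]
    split_ifs <;> simp_all
  · -- r < p < i
    have hs : PySem.List.sorted [(p:Int), (r:Int), (i:Int)] (fun x => x) = [(r:Int), (p:Int), (i:Int)] :=
      PySem.List.sorted_eq_of_perm_of_pairwise_lt _ _ _ (List.Perm.swap (p:Int) (r:Int) [(i:Int)])
        (by simp [List.pairwise_cons]; omega)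
    have c0 : ((r:Int) < (p:Int)) = True := by simp; omega
    have c1 : ((i:Int) < (p:Int)) = False := by simp; omega
    have c2 : ((p:Int) < (r:Int)) = False := by simp; omega
    simp only [pvArrangeA, pvPlaceB, pvSwapA, hs, c0, c1, c2, if_true, if_false]
    simp only [PySem.List.pySetD_natCast, PySem.List.pyGetD_natCast, List.map, List.zip,
      List.zipWith, List.foldl, List.getD_eq_getElem?_getD]
    apply List.ext_getElem (by simp)
    intro k hk1 hk2
    simp only [List.getElem_set, List.getElem?_set, List.length_set]
    split_ifs <;> simp_all
  · -- r < i < p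
    have hs : PySem.List.sorted [(p:Int), (r:Int), (i:Int)] (fun x => x) = [(r:Int), (i:Int), (p:Int)] :=
      PySem.List.sorted_eq_of_perm_of_pairwise_lt _ _ _ (((List.Perm.swap (p:Int) (i:Int) []).cons (r:Int)).trans (List.Perm.swap (p:Int) (r:Int) [(i:Int)]))
        (by simp [List.pairwise_cons]; omega)
    have c0 : ((r:Int) < (p:Int)) = True := by simp; omega
    have c1 : ((i:Int) < (p:Int)) = True := by simp; omega
    have c2 : ((i:Int) < (r:Int)) = False := by simp; omega
    simp only [pvArrangeA, pvPlaceB, pvSwapA, hs, c0, c1, c2, if_true, if_false]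
    simp only [PySem.List.pySetD_natCast, PySem.List.pyGetD_natCast, List.map, List.zip,
      List.zipWith, List.foldl, List.getD_eq_getElem?_getD]
    apply List.ext_getElem (by simp)
    intro k hk1 hk2
    simp only [List.getElem_set, List.getElem?_set, List.length_set]
    split_ifs <;> simp_all
  · -- i < r < p
    have hs : PySem.List.sorted [(p:Int), (r:Int), (i:Int)] (fun x => x) = [(i:Int), (r:Int), (p:Int)] :=
      PySem.List.sorted_eq_of_perm_of_pairwise_lt _ _ _ ((List.Perm.swap (r:Int) (i:Int) [(p:Int)]).trans (((List.Perm.swap (p:Int) (i:Int) []).cons (r:Int)).trans (List.Perm.swap (p:Int) (r:Int) [(i:Int)])))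
        (by simp [List.pairwise_cons]; omega)
    have c0 : ((r:Int) < (p:Int)) = True := by simp; omega
    have c1 : ((i:Int) < (p:Int)) = True := by simp; omega
    have c2 : ((i:Int) < (r:Int)) = True := by simp; omega
    simp only [pvArrangeA, pvPlaceB, pvSwapA, hs, c0, c1, c2, if_true]
    simp only [PySem.List.pySetD_natCast, PySem.List.pyGetD_natCast, List.map, List.zip,
      List.zipWith, List.foldl, List.getD_eq_getElem?_getD]
    apply List.ext_getElem (by simp)
    intro k hk1 hk2
    simp only [List.getElem_set, List.getElem?_set, List.length_set]
    split_ifs <;> simp_all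

-- ===== VERDICT (by name: the statement is the Claim_ definition above) =====
theorem reorder_parallel_nodes_py_spec : Claim_equal_reorder_parallel_nodes_py := by
  intro nodes hdom hpre
  unfold Spec_reorder_parallel_nodes_py
  simp only [reorder_parallel_nodes_py, reorder_parallel_nodes_py_alt,
    pvBuild_eq]
  set d := pvBuildA (PySem.List.enumerate nodes) PySem.Dict.empty with hd
  have hnd : d.keys.Nodup := pvBuild_nodup nodes 0 PySem.Dict.empty (by simp [PySem.Dict.keys_empty])
  have hsub : d.keys ⊆ pvDesiredA := pvBuild_keys_sub nodes
  by_cases hall : pvDesiredA.all (fun label => d.contains label) = true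
  · have hsize : d.size = 3 := (pvGuard_iff d hnd hsub).mp hall
    rw [if_pos hall, if_pos hsize]
    have hc : ∀ l ∈ pvDesiredA, ∃ j, d.get? l = some j := by
      intro l hl
      have := List.all_eq_true.mp hall l hl
      have := (PySem.Dict.contains_eq_isSome_get? d l) ▸ this
      exact Option.isSome_iff_exists.mp (by simpa using this)
    obtain ⟨jp, hjp⟩ := hc "Product Personalization Agent" (by decide)
    obtain ⟨jr, hjr⟩ := hc "Review Agent" (by decide)
    obtain ⟨ji, hji⟩ := hc "Inventory Agent" (by decide)
    have gp := pvBuild_inv nodes _ _ hjp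
    have gr := pvBuild_inv nodes _ _ hjr
    have gi := pvBuild_inv nodes _ _ hji
    have hgetp : d.getD "Product Personalization Agent" 0 = jp := by
      rw [PySem.Dict.getD_eq_get?_getD, hjp]; rfl
    have hgetr : d.getD "Review Agent" 0 = jr := by
      rw [PySem.Dict.getD_eq_get?_getD, hjr]; rfl
    have hgeti : d.getD "Inventory Agent" 0 = ji := by
      rw [PySem.Dict.getD_eq_get?_getD, hji]; rfl
    have hmap : pvDesiredB.map (fun label => d.getD label 0) = [jp, jr, ji] := by
      simp [pvDesiredB, hgetp, hgetr, hgeti]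
    rw [hmap, hgetp, hgetr, hgeti]
    have hpr : jp.toNat ≠ jr.toNat := by
      intro h
      have := gp.2.2.2
      rw [h, gr.2.2.2] at this
      exact absurd (Option.some.inj this) (by decide)
    have hpi : jp.toNat ≠ ji.toNat := by
      intro h
      have := gp.2.2.2
      rw [h, gi.2.2.2] at this
      exact absurd (Option.some.inj this) (by decide)
    have hri : jr.toNat ≠ ji.toNat := by
      intro h
      have := gr.2.2.2
      rw [h, gi.2.2.2] at this
      exact absurd (Option.some.inj this) (by decide)
    have ep : ((jp.toNat : Int)) = jp := Int.toNat_of_nonneg gp.2.1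
    have er : ((jr.toNat : Int)) = jr := Int.toNat_of_nonneg gr.2.1
    have ei : ((ji.toNat : Int)) = ji := Int.toNat_of_nonneg gi.2.1
    rw [← ep, ← er, ← ei]
    exact pvArrange_eq_place nodes jp.toNat jr.toNat ji.toNat
      gp.2.2.1 gr.2.2.1 gi.2.2.1 hpr hpi hri
  · have hsize : ¬ d.size = 3 := fun h => hall ((pvGuard_iff d hnd hsub).mpr h)
    rw [if_neg hall, if_neg hsize]
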